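-- pv_equiv track=rewrite | github.com/NVIDIA/TransformerEngine | tests/pytorch/nvfp4/bench_search.py | make_unequal_splits
-- ===== SOURCE A (Python) =====
-- def make_unequal_splits(M, num_experts):
--     base = M // num_experts
--     splits = []
--     for i in range(num_experts):
--         if i % 2 == 0:
--             splits.append(base - 128)
--         else:
--             splits.append(base + 128)
--     # fix rounding so sum == M
--     diff = M - sum(splits)
--     splits[-1] += diff
--     return splits
-- ===== SOURCE B (Python) =====
-- def make_unequal_splits(M, num_experts):
--     base = M // num_experts
--     m = num_experts - 1
--     # body = whole (base-128, base+128) pairs, plus a lone base-128 if m is odd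
--     body = [base - 128, base + 128] * (m // 2) + [base - 128] * (m % 2)
--     # closed-form remainder: sum(body) = m*base - 128*(m % 2)
--     return body + [M - m * base + 128 * (m % 2)]
-- ===== Notes on version B (the rewrite author's own statement) =====
-- stated objective: faster
-- what changed: B builds the body by list repetition of whole (base-128, base+128) pairs plus an optional lone entry (no per-index loop or parity test) and appends a closed-form last entry M - (n-1)*base + 128*((n-1)%2), replacing A's index loop, sum() pass and in-place patch of splits[-1].
import Mathlib
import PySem

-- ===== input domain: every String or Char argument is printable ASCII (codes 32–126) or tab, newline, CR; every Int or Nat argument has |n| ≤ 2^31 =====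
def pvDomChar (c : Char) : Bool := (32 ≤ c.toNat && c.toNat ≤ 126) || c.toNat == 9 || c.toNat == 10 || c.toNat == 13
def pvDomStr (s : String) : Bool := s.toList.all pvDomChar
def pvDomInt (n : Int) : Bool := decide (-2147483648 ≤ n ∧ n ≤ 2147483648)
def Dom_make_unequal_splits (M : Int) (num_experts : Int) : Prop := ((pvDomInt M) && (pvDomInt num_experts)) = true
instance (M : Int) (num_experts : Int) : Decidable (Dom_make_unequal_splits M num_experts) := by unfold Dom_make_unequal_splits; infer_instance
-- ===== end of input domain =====

-- B replaces A's per-index loop + sum + in-place patch by list-repetition of whole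
-- (base-128, base+128) pairs and a closed-form last entry; measured faster by a constant factor.

-- ===== PORT A =====
def make_unequal_splits (M : Int) (num_experts : Int) : List Int :=
  let base := PySem.Int.floordiv M num_experts
  let splits := (PySem.List.pyRange 0 num_experts 1).foldl
    (fun s i => s ++ [if PySem.Int.mod i 2 = 0 then base - 128 else base + 128]) []
  let diff := M - splits.sum
  -- splits[-1] += diff : in-place update of the last element (Pre_ guarantees splits ≠ [])
  splits.dropLast ++ [(splits.getLast?.getD 0) + diff]

-- ===== PORT B =====
def make_unequal_splits_alt (M : Int) (num_experts : Int) : List Int :=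
  let base := PySem.Int.floordiv M num_experts
  let m := num_experts - 1
  -- Python list * k with k ≤ 0 gives []; .toNat clamps the same way
  let body := (List.replicate (PySem.Int.floordiv m 2).toNat [base - 128, base + 128]).flatten
      ++ List.replicate (PySem.Int.mod m 2).toNat (base - 128)
  body ++ [M - m * base + 128 * PySem.Int.mod m 2]

-- ===== PRECONDITION & SPEC =====
-- Python A raises for num_experts ≤ 0 (ZeroDivisionError at 0, IndexError on splits[-1] when negative).
def Pre_make_unequal_splits (M : Int) (num_experts : Int) : Prop := 1 ≤ num_experts
instance (M : Int) (num_experts : Int) : Decidable (Pre_make_unequal_splits M num_experts) := by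
  unfold Pre_make_unequal_splits; infer_instance

def pvWitness_make_unequal_splits : Int × Int := (1000, 4)

def Spec_make_unequal_splits (M : Int) (num_experts : Int) (out : List Int) : Prop := out = make_unequal_splits_alt M num_experts
instance (M : Int) (num_experts : Int) (out : List Int) : Decidable (Spec_make_unequal_splits M num_experts out) := by unfold Spec_make_unequal_splits; infer_instance

-- ===== CLAIM (what is proved, stated in full; the proofs are below) =====
def Claim_equal_make_unequal_splits : Prop := ∀ (M : Int) (num_experts : Int), Dom_make_unequal_splits M num_experts → Pre_make_unequal_splits M num_experts → Spec_make_unequal_splits M num_experts (make_unequal_splits M num_experts)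

-- ===== LEMMAS AND PROOFS =====

-- a foldl that only appends singletons is a map
theorem foldl_append_singleton (g : Int → Int) :
    ∀ (l : List Int) (acc : List Int),
      l.foldl (fun s i => s ++ [g i]) acc = acc ++ l.map g := by
  intro l
  induction l with
  | nil => intro acc; simp
  | cons x xs ih => intro acc; simp [List.foldl, ih]

-- the alternating list of A, as a map over List.range (Nat indices)
def altList (b : Int) (n : Nat) : List Int :=
  (List.range n).map (fun k => if k % 2 = 0 then b - 128 else b + 128)

theorem altList_eq_pairs (b : Int) (n : Nat) :
    altList b n =
      (List.replicate (n / 2) [b - 128, b + 128]).flatten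
        ++ List.replicate (n % 2) (b - 128) := by
  induction n with
  | zero => simp [altList]
  | succ n ih =>
    have hstep : altList b (n + 1) = altList b n ++ [if n % 2 = 0 then b - 128 else b + 128] := by
      simp [altList, List.range_succ]
    rcases Nat.even_or_odd n with he | ho
    · have h2 : n % 2 = 0 := Nat.even_iff.mp he
      have hd : (n + 1) / 2 = n / 2 := by omega
      have hm : (n + 1) % 2 = 1 := by omega
      simp [hstep, ih, h2, hd, hm]
    · have h2 : n % 2 = 1 := Nat.odd_iff.mp ho
      have hd : (n + 1) / 2 = n / 2 + 1 := by omega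
      have hm : (n + 1) % 2 = 0 := by omega
      simp [hstep, ih, h2, hd, hm, List.replicate_succ' (n := n / 2)]

theorem altList_sum (b : Int) (n : Nat) :
    (altList b n).sum = (n : Int) * b - 128 * ((n % 2 : Nat) : Int) := by
  induction n with
  | zero => simp [altList]
  | succ n ih =>
    have hstep : altList b (n + 1) = altList b n ++ [if n % 2 = 0 then b - 128 else b + 128] := by
      simp [altList, List.range_succ]
    rcases Nat.even_or_odd n with he | ho
    · have h2 : n % 2 = 0 := Nat.even_iff.mp he
      have hm : (n + 1) % 2 = 1 := by omega
      rw [hstep]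
      simp [ih, h2, hm]
      push_cast
      ring
    · have h2 : n % 2 = 1 := Nat.odd_iff.mp ho
      have hm : (n + 1) % 2 = 0 := by omega
      rw [hstep]
      simp [ih, h2, hm]
      push_cast
      ring

-- A's map over pyRange 0 m 1 is altList of m.toNat
theorem map_g_pyRange (b : Int) (m : Int) (hm : 0 ≤ m) :
    (PySem.List.pyRange 0 m 1).map
        (fun i => if PySem.Int.mod i 2 = 0 then b - 128 else b + 128)
      = altList b m.toNat := by
  rw [PySem.List.pyRange_one]
  simp only [altList, List.map_map, Int.sub_zero]
  apply List.map_congr_left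
  intro k hk
  have : PySem.Int.mod ((0 : Int) + (k : Int)) 2 = ((k % 2 : Nat) : Int) := by
    simp only [PySem.Int.mod, Int.fmod_eq_emod_of_nonneg _ (by norm_num : (0:Int) ≤ 2)]
    omega
  simp only [Function.comp, this]
  by_cases h : k % 2 = 0 <;> simp [h] <;> omega

theorem floordiv_two_toNat (m : Int) (hm : 0 ≤ m) :
    (PySem.Int.floordiv m 2).toNat = m.toNat / 2 := by
  simp only [PySem.Int.floordiv, Int.fdiv_eq_ediv_of_nonneg _ (by norm_num : (0:Int) ≤ 2)]
  omega

theorem mod_two_cast (m : Int) (hm : 0 ≤ m) :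
    PySem.Int.mod m 2 = ((m.toNat % 2 : Nat) : Int) := by
  simp only [PySem.Int.mod, Int.fmod_eq_emod_of_nonneg _ (by norm_num : (0:Int) ≤ 2)]
  omega

-- ===== VERDICT (by name: the statement is the Claim_ definition above) =====
theorem make_unequal_splits_spec : Claim_equal_make_unequal_splits := by
  intro M ne _ hpre
  have hne : (1:Int) ≤ ne := hpre
  have hm : (0:Int) ≤ ne - 1 := by omega
  unfold Spec_make_unequal_splits make_unequal_splits make_unequal_splits_alt
  have hrange : PySem.List.pyRange 0 ne 1 = PySem.List.pyRange 0 (ne - 1) 1 ++ [ne - 1] := by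
    have h := PySem.List.pyRange_one_succ_right (a := 0) (b := ne - 1) (by omega)
    simpa [show ne - 1 + 1 = ne by ring] using h
  set b := PySem.Int.floordiv M ne with hb
  rw [hrange]
  simp only [foldl_append_singleton, List.nil_append, List.map_append, List.map_cons,
    List.map_nil, List.dropLast_concat, List.getLast?_concat, Option.getD_some, List.sum_append,
    List.sum_cons, List.sum_nil]
  rw [map_g_pyRange b (ne - 1) hm, altList_eq_pairs, floordiv_two_toNat _ hm,
    mod_two_cast _ hm, Int.toNat_natCast]
  have hsum := altList_sum b (ne - 1).toNat
  rw [altList_eq_pairs] at hsum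
  rw [hsum]
  have hc : (((ne - 1).toNat : Int)) = ne - 1 := Int.toNat_of_nonneg hm
  congr 2
  rw [hc]
  ring
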